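-- pv_equiv track=rewrite | github.com/1000century/Baekjoon | 코랩 코딩 스터디/이것이 코딩테스트다/3. BFS, DFS 240228~240303/BFS,DFS 2644 촌수계산_4 (gpt).py | dfs
-- ===== SOURCE A (Python) =====
-- def dfs(graph, x, y, visited=None, depth=0):
--     if visited is None:
--         visited = [False] * (len(graph) + 1)  # 그래프 크기에 맞춰 방문 배열 초기화
--     visited[x] = True  # 현재 노드 방문 표시
--     if x == y:  # 목표 노드에 도달했을 경우
--         return depth
--     for neighbor in graph[x]:  # 현재 노드의 모든 이웃에 대해
--         if not visited[neighbor]:  # 아직 방문하지 않은 이웃이 있다면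
--             result = dfs(graph, neighbor, y, visited, depth + 1)  # 재귀적으로 탐색
--             if result != -1:  # 경로를 찾았다면
--                 return result
--     return -1  # y에 도달할 수 없는 경우
-- ===== SOURCE B (Python) =====
-- # Iterative DFS with an explicit stack of (node, depth) pairs instead of recursion.
-- # Like the original, it mutates the caller-supplied `visited` list in place.
-- def dfs(graph, x, y, visited=None, depth=0):
--     if visited is None:
--         visited = [False] * (len(graph) + 1)
--     visited[x] = True
--     if x == y:
--         return depth
--     stack = [(n, depth + 1) for n in reversed(graph[x])]
--     while stack:
--         node, d = stack.pop()
--         if visited[node]: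
--             continue
--         visited[node] = True
--         if node == y:
--             return d
--         stack.extend((n, d + 1) for n in reversed(graph[node]))
--     return -1
-- ===== Notes on version B (the rewrite author's own statement) =====
-- stated objective: alternative
-- what changed: The recursive DFS is replaced by an iterative DFS over an explicit stack of (node, depth) pairs (rows pushed reversed, mark-on-pop), which visits nodes in the same order and returns the same first-discovery depth without recursion.
-- outside the precondition, e.g. on dfs([[1, 99], []], 0, 1, None, 0): A returns 1, B returns 1
import Mathlib
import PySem

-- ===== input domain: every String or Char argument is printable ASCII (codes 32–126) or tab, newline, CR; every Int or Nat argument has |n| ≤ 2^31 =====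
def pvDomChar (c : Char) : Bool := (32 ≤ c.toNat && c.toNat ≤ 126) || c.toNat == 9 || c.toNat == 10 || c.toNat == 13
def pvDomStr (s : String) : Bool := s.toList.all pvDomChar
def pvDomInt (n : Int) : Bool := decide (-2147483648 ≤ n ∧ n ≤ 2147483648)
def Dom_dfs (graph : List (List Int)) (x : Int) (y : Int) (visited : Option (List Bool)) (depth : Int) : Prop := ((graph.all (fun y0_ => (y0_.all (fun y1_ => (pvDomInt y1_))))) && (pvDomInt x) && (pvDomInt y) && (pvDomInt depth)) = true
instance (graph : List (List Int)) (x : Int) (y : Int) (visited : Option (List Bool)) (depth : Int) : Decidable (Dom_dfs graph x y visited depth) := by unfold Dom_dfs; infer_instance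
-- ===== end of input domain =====

-- B rewrites A's recursive DFS as an iterative DFS over an explicit stack of (node, depth)
-- pairs (objective: alternative decomposition, same visit order and result).
-- Both Pythons mutate a caller-supplied `visited` list in place; the equivalence proved here
-- is about the RETURN value only.

-- ===== PORT A =====
-- Python's 'if visited is None: visited = [False] * (len(graph) + 1)' (shared initialisation).
def initVis (graph : List (List Int)) (visited : Option (List Bool)) : List Bool :=
  match visited with
  | none => List.replicate (graph.length + 1) false
  | some v => v

mutual
/-- Port of A's recursive `dfs` body, threading the mutated `visited` list.
    `none` = IndexError (excluded by `Pre_dfs`).  The fuel `f` only guards termination: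
    every recursive call first marks a node that was unvisited at the call site, so
    `visited.length + 1` fuel is never exhausted on inputs `Pre_dfs` admits. -/
def dfsAux (graph : List (List Int)) (y : Int) (f : Nat) (x : Int) (v : List Bool) (d : Int) :
    Option (Int × List Bool) :=
  match f with
  | 0 => none
  | f' + 1 =>
    match PySem.List.pySet? v x true with        -- visited[x] = True
    | none => none
    | some v1 =>
      if x = y then some (d, v1)                 -- if x == y: return depth
      else
        match PySem.List.pyGet? graph x with     -- graph[x]
        | none => none
        | some row => scanAux graph y f' row v1 d
termination_by (f, 0)

/-- A's 'for neighbor in graph[x]: …' loop with its early returns. -/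
def scanAux (graph : List (List Int)) (y : Int) (f : Nat) (ns : List Int) (v : List Bool) (d : Int) :
    Option (Int × List Bool) :=
  match ns with
  | [] => some (-1, v)                           -- return -1
  | n :: rest =>
    match PySem.List.pyGet? v n with             -- if not visited[neighbor]:
    | none => none
    | some true => scanAux graph y f rest v d
    | some false =>
      match dfsAux graph y f n v (d + 1) with    -- result = dfs(graph, neighbor, y, visited, depth+1)
      | none => none
      | some (r, v') => if r ≠ -1 then some (r, v') else scanAux graph y f rest v' d
termination_by (f, ns.length + 1)
end

def dfs (graph : List (List Int)) (x : Int) (y : Int) (visited : Option (List Bool)) (depth : Int) : Int :=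
  let v0 := initVis graph visited
  match dfsAux graph y (v0.length + 1) x v0 depth with
  | none => 0                                    -- Python raises IndexError here (outside Pre_dfs)
  | some (r, _) => r

-- ===== PORT B =====
-- Termination helpers for the stack loop (cited by `decreasing_by`): marking an
-- unvisited index strictly decreases the number of `false` entries.
theorem pyIdx?_lt {n : Nat} {i : Int} {k : Nat} (h : PySem.List.pyIdx? n i = some k) : k < n := by
  unfold PySem.List.pyIdx? at h
  split_ifs at h <;> simp_all <;> omega

theorem count_false_set_true (v : List Bool) (k : Nat) (hk : k < v.length) (hf : v[k]? = some false) :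
    (v.set k true).count false < v.count false := by
  induction v generalizing k with
  | nil => simp at hk
  | cons a v ih =>
    cases k with
    | zero => simp_all [List.count_cons]
    | succ k =>
      have := ih k (by simpa using hk) (by simpa using hf)
      simp only [List.set_cons_succ, List.count_cons]
      omega

theorem cf_mark_lt {v v1 : List Bool} {n : Int}
    (h1 : PySem.List.pyGet? v n = some false) (h2 : PySem.List.pySet? v n true = some v1) :
    v1.count false < v.count false := by
  unfold PySem.List.pyGet? at h1
  unfold PySem.List.pySet? at h2
  cases hk : PySem.List.pyIdx? v.length n with
  | none => rw [hk] at h1; simp at h1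
  | some k =>
    rw [hk] at h1 h2
    simp at h1 h2
    subst h2
    exact count_false_set_true v k (pyIdx?_lt hk) h1

/-- Port of B's `while stack:` loop.  Python's stack is a list popped from the right and
    extended with `reversed(row)`; modelled head-as-top (pushing a reversed row then popping
    from the right = consuming `row` in order), which is exact. `none` = IndexError. -/
def dfsLoop (graph : List (List Int)) (y : Int) (S : List (Int × Int)) (v : List Bool) : Option Int :=
  match S with
  | [] => some (-1)                              -- loop ended: return -1
  | (n, d) :: rest =>
    match h1 : PySem.List.pyGet? v n with        -- if visited[node]: continue
    | none => none
    | some true => dfsLoop graph y rest v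
    | some false =>
      match h2 : PySem.List.pySet? v n true with -- visited[node] = True
      | none => none
      | some v1 =>
        if n = y then some d                     -- if node == y: return d
        else
          match PySem.List.pyGet? graph n with   -- graph[node]
          | none => none
          | some row => dfsLoop graph y (row.map (fun m => (m, d + 1)) ++ rest) v1
termination_by (v.count false, S.length)
decreasing_by
  · exact Prod.Lex.right _ (by simp only [List.length_cons]; omega)
  · exact Prod.Lex.left _ _ (cf_mark_lt h1 h2)

def dfs_alt (graph : List (List Int)) (x : Int) (y : Int) (visited : Option (List Bool)) (depth : Int) : Int :=
  let v0 := initVis graph visited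
  match PySem.List.pySet? v0 x true with         -- visited[x] = True
  | none => 0                                    -- Python raises IndexError here (outside Pre_dfs)
  | some v1 =>
    if x = y then depth
    else
      match PySem.List.pyGet? graph x with
      | none => 0
      | some row => (dfsLoop graph y (row.map (fun m => (m, depth + 1))) v1).getD 0

-- ===== PRECONDITION & SPEC =====
-- One expansion step of DFS reachability from a set of nodes: a node n ≠ y contributes the
-- initially-unvisited, non-target entries of its row.
def reachStep (graph : List (List Int)) (y : Int) (V0 : List Bool) (S : Finset Int) : Finset Int :=
  S ∪ S.biUnion (fun n =>
    if n = y then ∅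
    else (((PySem.List.pyGet? graph n).getD []).filter
      (fun m => m != y && !((PySem.List.pyGet? V0 m).getD true))).toFinset)

/-- All nodes the DFS can enter: the fixed point of `reachStep` from `{x}` (reached after at
    most `|pool|` productive rounds, so `|pool| + 1` iterations suffice). -/
def reachSet (graph : List (List Int)) (x y : Int) (V0 : List Bool) : Finset Int :=
  (reachStep graph y V0)^[(insert x graph.flatten.toFinset).card + 1] {x}

-- Pre_dfs: x is a valid index of the visited array, and every node the DFS can enter indexes
-- validly into graph and visited.  This excludes exactly the inputs where A raises IndexError,
-- plus some inputs where A happens to return (-1 or the target's depth) before touching an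
-- invalid entry because it stops at y or prunes via already-visited nodes (see claim cites).
def Pre_dfs (graph : List (List Int)) (x : Int) (y : Int) (visited : Option (List Bool)) (depth : Int) : Prop :=
  PySem.Raise.InRange (initVis graph visited).length x ∧
  ∀ n ∈ reachSet graph x y (initVis graph visited), n = y ∨
    (PySem.Raise.InRange graph.length n ∧
     ∀ m ∈ (PySem.List.pyGet? graph n).getD [], PySem.Raise.InRange (initVis graph visited).length m)

instance (graph : List (List Int)) (x : Int) (y : Int) (visited : Option (List Bool)) (depth : Int) :
    Decidable (Pre_dfs graph x y visited depth) := by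
  unfold Pre_dfs PySem.Raise.InRange; infer_instance

def pvWitness_dfs : List (List Int) × Int × Int × Option (List Bool) × Int :=
  ([[1, 2], [2], []], 0, 2, none, 0)

def Spec_dfs (graph : List (List Int)) (x : Int) (y : Int) (visited : Option (List Bool)) (depth : Int) (out : Int) : Prop := out = dfs_alt graph x y visited depth
instance (graph : List (List Int)) (x : Int) (y : Int) (visited : Option (List Bool)) (depth : Int) (out : Int) : Decidable (Spec_dfs graph x y visited depth out) := by unfold Spec_dfs; infer_instance

-- ===== CLAIM (what is proved, stated in full; the proofs are below) =====
def Claim_equal_dfs : Prop := ∀ (graph : List (List Int)) (x : Int) (y : Int) (visited : Option (List Bool)) (depth : Int), Dom_dfs graph x y visited depth → Pre_dfs graph x y visited depth → Spec_dfs graph x y visited depth (dfs graph x y visited depth)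

-- ===== LEMMAS AND PROOFS =====

-- The second conjunct of Pre_dfs, as used by the simulation lemmas.
def Valid (graph : List (List Int)) (x y : Int) (V0 : List Bool) : Prop :=
  ∀ n ∈ reachSet graph x y V0, n = y ∨
    (PySem.Raise.InRange graph.length n ∧
     ∀ m ∈ (PySem.List.pyGet? graph n).getD [], PySem.Raise.InRange (V0).length m)

-- A visited-state reachable from the initial one: same length, and marks only grow.
def GoodSt (V0 v : List Bool) : Prop :=
  v.length = V0.length ∧ ∀ m : Int, PySem.List.pyGet? V0 m = some true → PySem.List.pyGet? v m = some true

-- A node value that may legally sit on the pending stack / in a pending row.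
def GoodN (graph : List (List Int)) (x y : Int) (V0 : List Bool) (m : Int) : Prop :=
  PySem.Raise.InRange V0.length m ∧
  (m ≠ y → PySem.List.pyGet? V0 m = some false → m ∈ reachSet graph x y V0)

theorem reachStep_subset (graph : List (List Int)) (y : Int) (V0 : List Bool) (S : Finset Int) :
    S ⊆ reachStep graph y V0 S := Finset.subset_union_left

theorem pyGet?_mem' {α : Type} {xs : List α} {i : Int} {a : α}
    (h : PySem.List.pyGet? xs i = some a) : a ∈ xs := by
  unfold PySem.List.pyGet? at h
  cases hk : PySem.List.pyIdx? xs.length i with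
  | none => rw [hk] at h; simp at h
  | some k => rw [hk] at h; simp at h; exact List.mem_of_getElem? h

theorem reachStep_pool (graph : List (List Int)) (x y : Int) (V0 : List Bool) (S : Finset Int)
    (h : S ⊆ insert x graph.flatten.toFinset) :
    reachStep graph y V0 S ⊆ insert x graph.flatten.toFinset := by
  intro m hm
  rcases Finset.mem_union.1 hm with hm | hm
  · exact h hm
  · rcases Finset.mem_biUnion.1 hm with ⟨n, hn, hmn⟩
    split_ifs at hmn with hny
    · simp at hmn
    · rcases List.mem_toFinset.1 hmn with hmf
      have hrow := List.mem_of_mem_filter hmf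
      cases hg : PySem.List.pyGet? graph n with
      | none => rw [hg] at hrow; simp at hrow
      | some row =>
        rw [hg] at hrow; simp at hrow
        exact Finset.mem_insert_of_mem (List.mem_toFinset.2 (List.mem_flatten.2 ⟨row, pyGet?_mem' hg, hrow⟩))

theorem iterate_subset_pool (graph : List (List Int)) (x y : Int) (V0 : List Bool) (n : Nat) :
    (reachStep graph y V0)^[n] {x} ⊆ insert x graph.flatten.toFinset := by
  induction n with
  | zero => simp
  | succ n ih =>
    rw [Function.iterate_succ_apply']
    exact reachStep_pool graph x y V0 _ ih

theorem iterate_mono (graph : List (List Int)) (x y : Int) (V0 : List Bool) (n : Nat) :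
    (reachStep graph y V0)^[n] {x} ⊆ (reachStep graph y V0)^[n+1] {x} := by
  rw [Function.iterate_succ_apply']
  exact reachStep_subset graph y V0 _

theorem reachSet_fix (graph : List (List Int)) (x y : Int) (V0 : List Bool) :
    reachStep graph y V0 (reachSet graph x y V0) = reachSet graph x y V0 := by
  set g := reachStep graph y V0 with hg
  set P := insert x graph.flatten.toFinset with hP
  have hfix : ∃ k ≤ P.card, g^[k+1] {x} = g^[k] {x} := by
    by_contra hcon
    push_neg at hcon
    have grow : ∀ k, k ≤ P.card → k + 1 ≤ (g^[k] ({x} : Finset Int)).card := by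
      intro k hk
      induction k with
      | zero => simp
      | succ k ih =>
        have h1 := ih (Nat.le_of_succ_le hk)
        have hne := hcon k (Nat.le_of_succ_le hk)
        have hsub := iterate_mono graph x y V0 k
        have : (g^[k] ({x} : Finset Int)).card < (g^[k+1] ({x} : Finset Int)).card :=
          Finset.card_lt_card (lt_of_le_of_ne hsub (fun he => hne he.symm))
        omega
    have h1 := grow P.card le_rfl
    have h2 := Finset.card_le_card (iterate_subset_pool graph x y V0 P.card)
    rw [← hg, ← hP] at h2
    omega
  rcases hfix with ⟨k, hk, hfixk⟩
  have stable : ∀ j, g^[k + j] ({x} : Finset Int) = g^[k] {x} := by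
    intro j
    induction j with
    | zero => rfl
    | succ j ih =>
      have h3 : k + (j+1) = (k + j) + 1 := by omega
      calc g^[k+(j+1)] ({x} : Finset Int) = g^[(k+j)+1] {x} := by rw [h3]
        _ = g (g^[k+j] {x}) := Function.iterate_succ_apply' g (k+j) {x}
        _ = g (g^[k] {x}) := by rw [ih]
        _ = g^[k+1] {x} := (Function.iterate_succ_apply' g k {x}).symm
        _ = g^[k] {x} := hfixk
  have hN : P.card + 1 = k + (P.card + 1 - k) := by omega
  have e1 : g^[P.card + 1] ({x} : Finset Int) = g^[k] {x} := by rw [hN]; exact stable _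
  show g (g^[P.card + 1] {x}) = g^[P.card+1] {x}
  calc g (g^[P.card+1] ({x} : Finset Int)) = g (g^[k] {x}) := by rw [e1]
    _ = g^[k+1] {x} := (Function.iterate_succ_apply' g k {x}).symm
    _ = g^[k] {x} := hfixk
    _ = g^[P.card+1] {x} := e1.symm

theorem reachSet_start (graph : List (List Int)) (x y : Int) (V0 : List Bool) :
    x ∈ reachSet graph x y V0 := by
  unfold reachSet
  have h : ∀ n, x ∈ (reachStep graph y V0)^[n] ({x} : Finset Int) := by
    intro n
    induction n with
    | zero => simp
    | succ n ih => exact iterate_mono graph x y V0 n ih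
  exact h _

theorem reachSet_closed (graph : List (List Int)) (x y : Int) (V0 : List Bool) :
    ∀ n ∈ reachSet graph x y V0, n ≠ y →
    ∀ m ∈ (PySem.List.pyGet? graph n).getD [], m ≠ y →
    PySem.List.pyGet? V0 m = some false → m ∈ reachSet graph x y V0 := by
  intro n hn hny m hm hmy hm0
  have hfix := reachSet_fix graph x y V0
  rw [← hfix]
  apply Finset.mem_union_right
  apply Finset.mem_biUnion.2
  refine ⟨n, hn, ?_⟩
  rw [if_neg hny]
  apply List.mem_toFinset.2
  apply List.mem_filter.2
  refine ⟨hm, ?_⟩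
  simp [hmy, hm0]

theorem pyGet?_idx {α : Type} {v : List α} {i : Int} {b : α} (h : PySem.List.pyGet? v i = some b) :
    ∃ k, PySem.List.pyIdx? v.length i = some k ∧ v[k]? = some b := by
  unfold PySem.List.pyGet? at h
  cases hk : PySem.List.pyIdx? v.length i with
  | none => rw [hk] at h; simp at h
  | some k => rw [hk] at h; simp at h; exact ⟨k, rfl, h⟩

theorem pyIdx?_of_inRange {n : Nat} {i : Int} (h : PySem.Raise.InRange n i) :
    ∃ k, PySem.List.pyIdx? n i = some k := by
  obtain ⟨h1, h2⟩ := h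
  unfold PySem.List.pyIdx?
  split_ifs <;> simp_all <;> omega

theorem pyGet?_total {α : Type} {xs : List α} {i : Int} (h : PySem.Raise.InRange xs.length i) :
    ∃ a, PySem.List.pyGet? xs i = some a := by
  obtain ⟨k, hk⟩ := pyIdx?_of_inRange h
  refine ⟨xs[k]'(pyIdx?_lt hk), ?_⟩
  unfold PySem.List.pyGet?
  rw [hk]
  simp [List.getElem?_eq_getElem (pyIdx?_lt hk)]

theorem pySet?_of_idx {α : Type} {v : List α} {i : Int} {k : Nat} (c : α)
    (hk : PySem.List.pyIdx? v.length i = some k) :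
    PySem.List.pySet? v i c = some (v.set k c) := by
  unfold PySem.List.pySet?
  rw [hk]; rfl

theorem pyGet?_set_same {v : List Bool} {n : Int} {k : Nat}
    (hk : PySem.List.pyIdx? v.length n = some k) :
    PySem.List.pyGet? (v.set k true) n = some true := by
  unfold PySem.List.pyGet?
  rw [List.length_set, hk]
  simp [List.getElem?_set, pyIdx?_lt hk]

theorem pyGet?_set_mono {v : List Bool} {m : Int} {k : Nat} (hk : k < v.length)
    (hm : PySem.List.pyGet? v m = some true) :
    PySem.List.pyGet? (v.set k true) m = some true := by
  obtain ⟨j, hj, hval⟩ := pyGet?_idx hm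
  unfold PySem.List.pyGet?
  rw [List.length_set, hj]
  simp only [Option.bind_some]
  rw [List.getElem?_set]
  split_ifs with h
  · simp_all
  · exact hval

theorem goodSt_refl (V0 : List Bool) : GoodSt V0 V0 := ⟨rfl, fun _ h => h⟩

theorem goodSt_mark {V0 v v1 : List Bool} {n : Int} (g : GoodSt V0 v)
    (h2 : PySem.List.pySet? v n true = some v1) : GoodSt V0 v1 := by
  unfold PySem.List.pySet? at h2
  cases hk : PySem.List.pyIdx? v.length n with
  | none => rw [hk] at h2; simp at h2
  | some k =>
    rw [hk] at h2; simp at h2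
    subst h2
    exact ⟨by rw [List.length_set]; exact g.1,
      fun m hm => pyGet?_set_mono (pyIdx?_lt hk) (g.2 m hm)⟩

theorem init_false {V0 v : List Bool} {m : Int} (g : GoodSt V0 v)
    (h : PySem.List.pyGet? v m = some false) : PySem.List.pyGet? V0 m = some false := by
  obtain ⟨k, hk, hv⟩ := pyGet?_idx h
  rw [g.1] at hk
  have hkV : k < V0.length := pyIdx?_lt hk
  have hV0 : PySem.List.pyGet? V0 m = some (V0[k]) := by
    unfold PySem.List.pyGet?
    rw [hk]
    simp [List.getElem?_eq_getElem hkV]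
  cases hb : V0[k] with
  | false => rw [hb] at hV0; exact hV0
  | true =>
    rw [hb] at hV0
    have := g.2 m hV0
    rw [h] at this
    simp at this

theorem cf_pos {v : List Bool} {n : Int} (h : PySem.List.pyGet? v n = some false) :
    0 < v.count false := by
  obtain ⟨k, hk, hv⟩ := pyGet?_idx h
  exact List.count_pos_iff.2 (List.mem_of_getElem? hv)

theorem inRange_mono {V0 v : List Bool} {m : Int} (g : GoodSt V0 v)
    (h : PySem.Raise.InRange V0.length m) : PySem.Raise.InRange v.length m := by
  rw [g.1]; exact h

theorem row_of_valid {graph : List (List Int)} {x y : Int} {V0 : List Bool}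
    (hval : Valid graph x y V0) {m : Int} (hm : m ∈ reachSet graph x y V0) (hmy : m ≠ y) :
    ∃ row, PySem.List.pyGet? graph m = some row ∧ ∀ mm ∈ row, PySem.Raise.InRange V0.length mm := by
  rcases hval m hm with h | ⟨hg, hrow⟩
  · exact absurd h hmy
  · obtain ⟨row, hr⟩ := pyGet?_total hg
    refine ⟨row, hr, fun mm hmm => hrow mm ?_⟩
    rw [hr]
    simpa using hmm

theorem goodN_row {graph : List (List Int)} {x y : Int} {V0 : List Bool}
    (hval : Valid graph x y V0) {n : Int} (hn : n ∈ reachSet graph x y V0) (hny : n ≠ y)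
    {row : List Int} (hr : PySem.List.pyGet? graph n = some row) :
    ∀ mm ∈ row, GoodN graph x y V0 mm := by
  intro mm hmm
  obtain ⟨row', hr', hIn⟩ := row_of_valid hval hn hny
  rw [hr] at hr'
  cases hr'
  refine ⟨hIn mm hmm, fun hmmy hmm0 => ?_⟩
  exact reachSet_closed graph x y V0 n hn hny mm (by rw [hr]; simpa using hmm) hmmy hmm0

theorem deadA (graph : List (List Int)) (x y : Int) (V0 : List Bool) (hval : Valid graph x y V0) :
    ∀ (f : Nat) (ns : List Int) (v : List Bool) (d : Int),
    v.count false ≤ f → GoodSt V0 v → (∀ m ∈ ns, GoodN graph x y V0 m) →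
    PySem.List.pyGet? v y = some true →
    ∃ v', scanAux graph y f ns v d = some (-1, v') ∧ GoodSt V0 v' ∧
      v'.count false ≤ v.count false ∧ PySem.List.pyGet? v' y = some true := by
  intro f
  induction f using Nat.strong_induction_on with
  | _ f ihf =>
  intro ns
  induction ns with
  | nil =>
    intro v d hcf g hns hy
    exact ⟨v, by rw [scanAux], g, le_refl _, hy⟩
  | cons n rest ih =>
    intro v d hcf g hns hy
    have hnG : GoodN graph x y V0 n := hns n (by simp)
    have hnR : PySem.Raise.InRange v.length n := inRange_mono g hnG.1
    obtain ⟨b, hb⟩ := pyGet?_total hnR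
    have hnstail : ∀ m ∈ rest, GoodN graph x y V0 m := fun m hm => hns m (by simp [hm])
    cases b with
    | true =>
      obtain ⟨v3, e3, g3, hcf3, hy3⟩ := ih v d hcf g hnstail hy
      refine ⟨v3, ?_, g3, hcf3, hy3⟩
      rw [scanAux]
      simp only [hb]
      exact e3
    | false =>
      have hpos : 0 < v.count false := cf_pos hb
      cases f with
      | zero => omega
      | succ f' =>
        obtain ⟨k, hk, hkv⟩ := pyGet?_idx hb
        have hset : PySem.List.pySet? v n true = some (v.set k true) := pySet?_of_idx true hk
        have hny : n ≠ y := fun he => by rw [he, hy] at hb; simp at hb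
        have h0 : PySem.List.pyGet? V0 n = some false := init_false g hb
        have hnRS : n ∈ reachSet graph x y V0 := hnG.2 hny h0
        obtain ⟨row, hr, _⟩ := row_of_valid hval hnRS hny
        have hcf1 : (v.set k true).count false ≤ f' := by
          have := cf_mark_lt hb hset
          omega
        obtain ⟨v2, e2, g2, hcf2, hy2⟩ := ihf f' (Nat.lt_succ_self f') row (v.set k true) (d + 1)
          hcf1 (goodSt_mark g hset) (goodN_row hval hnRS hny hr)
          (pyGet?_set_mono (pyIdx?_lt hk) hy)
        have hdfs : dfsAux graph y (f' + 1) n v (d + 1) = some (-1, v2) := by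
          rw [dfsAux]
          simp only [hset, if_neg hny, hr]
          exact e2
        have hcf2' : v2.count false ≤ f' + 1 := by
          have := cf_mark_lt hb hset
          omega
        obtain ⟨v3, e3, g3, hcf3, hy3⟩ := ih v2 d hcf2' g2 hnstail hy2
        refine ⟨v3, ?_, g3, ?_, hy3⟩
        · rw [scanAux]
          simp only [hb, hdfs]
          simpa using e3
        · have := cf_mark_lt hb hset
          omega

-- One-step evaluation lemmas for the stack loop (its named-pattern matches do not reduce by simp).
theorem dfsLoop_nil (graph : List (List Int)) (y : Int) (v : List Bool) :
    dfsLoop graph y [] v = some (-1) := by rw [dfsLoop]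

theorem dfsLoop_skip (graph : List (List Int)) (y n d : Int) (rest : List (Int × Int)) (v : List Bool)
    (hb : PySem.List.pyGet? v n = some true) :
    dfsLoop graph y ((n, d) :: rest) v = dfsLoop graph y rest v := by
  rw [dfsLoop]
  split
  · rename_i h; rw [hb] at h; simp at h
  · rfl
  · rename_i h; rw [hb] at h; simp at h

theorem dfsLoop_found (graph : List (List Int)) (y n d : Int) (rest : List (Int × Int)) (v v1 : List Bool)
    (hb : PySem.List.pyGet? v n = some false) (hs : PySem.List.pySet? v n true = some v1)
    (hny : n = y) :
    dfsLoop graph y ((n, d) :: rest) v = some d := by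
  rw [dfsLoop]
  split
  · rename_i h; rw [hb] at h; simp at h
  · rename_i h; rw [hb] at h; simp at h
  · rename_i h
    split
    · rename_i h2; rw [hs] at h2; simp at h2
    · rename_i v1' h2
      rw [if_pos hny]

theorem dfsLoop_enter (graph : List (List Int)) (y n d : Int) (rest : List (Int × Int)) (v v1 : List Bool)
    (row : List Int)
    (hb : PySem.List.pyGet? v n = some false) (hs : PySem.List.pySet? v n true = some v1)
    (hny : ¬ n = y) (hr : PySem.List.pyGet? graph n = some row) :
    dfsLoop graph y ((n, d) :: rest) v = dfsLoop graph y (row.map (fun m => (m, d + 1)) ++ rest) v1 := by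
  rw [dfsLoop]
  split
  · rename_i h; rw [hb] at h; simp at h
  · rename_i h; rw [hb] at h; simp at h
  · rename_i h
    split
    · rename_i h2; rw [hs] at h2; simp at h2
    · rename_i v1' h2
      rw [if_neg hny]
      rw [hs] at h2
      cases h2
      rw [hr]

theorem deadB (graph : List (List Int)) (x y : Int) (V0 : List Bool) (hval : Valid graph x y V0) :
    ∀ (N : Nat) (v : List Bool) (S : List (Int × Int)),
    v.count false ≤ N → GoodSt V0 v → (∀ p ∈ S, GoodN graph x y V0 p.1) →
    PySem.List.pyGet? v y = some true →
    dfsLoop graph y S v = some (-1) := by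
  intro N
  induction N with
  | zero =>
    intro v S hcf g hS hy
    induction S with
    | nil => exact dfsLoop_nil graph y v
    | cons p rest ihS =>
      obtain ⟨n, d⟩ := p
      have hnG : GoodN graph x y V0 n := hS (n, d) (by simp)
      have hnR : PySem.Raise.InRange v.length n := inRange_mono g hnG.1
      obtain ⟨b, hb⟩ := pyGet?_total hnR
      cases b with
      | true =>
        rw [dfsLoop_skip graph y n d rest v hb]
        exact ihS (fun p hp => hS p (by simp [hp]))
      | false => exact absurd (cf_pos hb) (by omega)
  | succ N ihN =>
    intro v S hcf g hS hy
    induction S with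
    | nil => exact dfsLoop_nil graph y v
    | cons p rest ihS =>
      obtain ⟨n, d⟩ := p
      have hnG : GoodN graph x y V0 n := hS (n, d) (by simp)
      have hnR : PySem.Raise.InRange v.length n := inRange_mono g hnG.1
      obtain ⟨b, hb⟩ := pyGet?_total hnR
      cases b with
      | true =>
        rw [dfsLoop_skip graph y n d rest v hb]
        exact ihS (fun p hp => hS p (by simp [hp]))
      | false =>
        obtain ⟨k, hk, hkv⟩ := pyGet?_idx hb
        have hset : PySem.List.pySet? v n true = some (v.set k true) := pySet?_of_idx true hk
        have hny : n ≠ y := fun he => by rw [he, hy] at hb; simp at hb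
        have h0 : PySem.List.pyGet? V0 n = some false := init_false g hb
        have hnRS : n ∈ reachSet graph x y V0 := hnG.2 hny h0
        obtain ⟨row, hr, _⟩ := row_of_valid hval hnRS hny
        rw [dfsLoop_enter graph y n d rest v _ row hb hset hny hr]
        apply ihN
        · have := cf_mark_lt hb hset
          omega
        · exact goodSt_mark g hset
        · intro p hp
          rcases List.mem_append.1 hp with hp | hp
          · obtain ⟨mm, hmm, he⟩ := List.mem_map.1 hp
            cases he
            exact goodN_row hval hnRS hny hr mm hmm
          · exact hS p (List.mem_cons_of_mem _ hp)
        · exact pyGet?_set_mono (pyIdx?_lt hk) hy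

theorem simMain (graph : List (List Int)) (x y : Int) (V0 : List Bool) (hval : Valid graph x y V0) :
    ∀ (f : Nat) (ns : List Int) (v : List Bool) (d : Int) (S : List (Int × Int)),
    v.count false ≤ f → GoodSt V0 v → (∀ m ∈ ns, GoodN graph x y V0 m) →
    (∀ p ∈ S, GoodN graph x y V0 p.1) →
    ∃ r v', scanAux graph y f ns v d = some (r, v') ∧ GoodSt V0 v' ∧
      v'.count false ≤ v.count false ∧
      dfsLoop graph y (ns.map (fun m => (m, d + 1)) ++ S) v =
        (if r = -1 then dfsLoop graph y S v' else some r) := by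
  intro f
  induction f using Nat.strong_induction_on with
  | _ f ihf =>
  intro ns
  induction ns with
  | nil =>
    intro v d S hcf g hns hS
    exact ⟨-1, v, by rw [scanAux], g, le_refl _, by simp⟩
  | cons n rest ih =>
    intro v d S hcf g hns hS
    have hnG : GoodN graph x y V0 n := hns n (by simp)
    have hnR : PySem.Raise.InRange v.length n := inRange_mono g hnG.1
    obtain ⟨b, hb⟩ := pyGet?_total hnR
    have hnstail : ∀ m ∈ rest, GoodN graph x y V0 m := fun m hm => hns m (by simp [hm])
    cases b with
    | true =>
      obtain ⟨r, v', e, g', hcf', heq⟩ := ih v d S hcf g hnstail hS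
      refine ⟨r, v', ?_, g', hcf', ?_⟩
      · rw [scanAux]
        simp only [hb]
        exact e
      · rw [List.map_cons, List.cons_append, dfsLoop_skip graph y n (d+1) _ v hb]
        exact heq
    | false =>
      have hpos : 0 < v.count false := cf_pos hb
      cases f with
      | zero => omega
      | succ f' =>
        obtain ⟨k, hk, hkv⟩ := pyGet?_idx hb
        have hset : PySem.List.pySet? v n true = some (v.set k true) := pySet?_of_idx true hk
        have hcfset : (v.set k true).count false < v.count false := cf_mark_lt hb hset
        have gset : GoodSt V0 (v.set k true) := goodSt_mark g hset
        by_cases hny : n = y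
        · -- the neighbor is the target: A returns depth+1 from the recursive call,
          -- B returns it at the pop; if depth+1 = -1 A suppresses it and drains to -1, as does B's caller
          have hyv1 : PySem.List.pyGet? (v.set k true) y = some true := by
            rw [← hny]
            exact pyGet?_set_same hk
          have hdfs : dfsAux graph y (f' + 1) n v (d + 1) = some (d + 1, v.set k true) := by
            rw [dfsAux]
            simp only [hset, if_pos hny]
          by_cases hd : (d + 1 : Int) = -1
          · obtain ⟨v2, e2, g2, hcf2, hy2⟩ := deadA graph x y V0 hval (f' + 1) rest (v.set k true) d
              (by omega) gset hnstail hyv1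
            refine ⟨-1, v2, ?_, g2, by omega, ?_⟩
            · rw [scanAux]
              simp only [hb, hdfs]
              rw [if_neg (by simp [hd])]
              exact e2
            · rw [List.map_cons, List.cons_append,
                dfsLoop_found graph y n (d+1) _ v (v.set k true) hb hset hny, hd]
              rw [if_pos rfl]
              exact (deadB graph x y V0 hval (v2.count false) v2 S (le_refl _) g2
                (fun p hp => hS p hp) hy2).symm
          · refine ⟨d + 1, v.set k true, ?_, gset, by omega, ?_⟩
            · rw [scanAux]
              simp only [hb, hdfs]
              simp [hd]
            · rw [List.map_cons, List.cons_append,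
                dfsLoop_found graph y n (d+1) _ v (v.set k true) hb hset hny]
              rw [if_neg hd]
        · -- enter the neighbor
          have h0 : PySem.List.pyGet? V0 n = some false := init_false g hb
          have hnRS : n ∈ reachSet graph x y V0 := hnG.2 hny h0
          obtain ⟨row, hr, _⟩ := row_of_valid hval hnRS hny
          obtain ⟨r1, v2, e2, g2, hcf2, heq2⟩ := ihf f' (Nat.lt_succ_self f') row (v.set k true) (d + 1)
            (rest.map (fun m => (m, d + 1)) ++ S) (by omega) gset
            (goodN_row hval hnRS hny hr)
            (by
              intro p hp
              rcases List.mem_append.1 hp with hp | hp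
              · obtain ⟨mm, hmm, he⟩ := List.mem_map.1 hp
                cases he
                exact hnstail mm hmm
              · exact hS p hp)
          have hdfs : dfsAux graph y (f' + 1) n v (d + 1) = some (r1, v2) := by
            rw [dfsAux]
            simp only [hset, if_neg hny, hr]
            exact e2
          have hBstep : dfsLoop graph y ((n, d+1) :: (rest.map (fun m => (m, d + 1)) ++ S)) v =
              dfsLoop graph y (row.map (fun m => (m, d + 1 + 1)) ++ (rest.map (fun m => (m, d + 1)) ++ S)) (v.set k true) :=
            dfsLoop_enter graph y n (d+1) _ v (v.set k true) row hb hset hny hr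
          by_cases hr1 : r1 = -1
          · obtain ⟨r3, v3, e3, g3, hcf3, heq3⟩ := ih v2 d S (by omega) g2 hnstail hS
            refine ⟨r3, v3, ?_, g3, by omega, ?_⟩
            · rw [scanAux]
              simp only [hb, hdfs, hr1]
              simpa using e3
            · rw [List.map_cons, List.cons_append, hBstep, heq2, if_pos hr1]
              exact heq3
          · refine ⟨r1, v2, ?_, g2, by omega, ?_⟩
            · rw [scanAux]
              simp only [hb, hdfs]
              simp [hr1]
            · rw [List.map_cons, List.cons_append, hBstep, heq2, if_neg hr1, if_neg hr1]

-- ===== VERDICT (by name: the statement is the Claim_ definition above) =====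
theorem dfs_spec : Claim_equal_dfs := by
  intro graph x y visited depth _hdom hpre
  unfold Spec_dfs
  have hx : PySem.Raise.InRange (initVis graph visited).length x := hpre.1
  have hval : Valid graph x y (initVis graph visited) := hpre.2
  obtain ⟨k, hk⟩ := pyIdx?_of_inRange hx
  have hset : PySem.List.pySet? (initVis graph visited) x true
      = some ((initVis graph visited).set k true) := pySet?_of_idx true hk
  by_cases hxy : x = y
  · have hA : dfsAux graph y ((initVis graph visited).length + 1) x (initVis graph visited) depth
        = some (depth, (initVis graph visited).set k true) := by
      rw [dfsAux]
      simp only [hset, if_pos hxy]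
    simp only [dfs, dfs_alt, hA, hset, if_pos hxy]
  · obtain ⟨row, hr, _⟩ := row_of_valid hval (reachSet_start graph x y _) hxy
    have gset : GoodSt (initVis graph visited) ((initVis graph visited).set k true) :=
      goodSt_mark (goodSt_refl _) hset
    have hcnt : ((initVis graph visited).set k true).count false ≤ (initVis graph visited).length := by
      have h1 := List.count_le_length (a := false) (l := (initVis graph visited).set k true)
      rw [List.length_set] at h1
      exact h1
    obtain ⟨r, v', e, g', hcf', heq⟩ := simMain graph x y (initVis graph visited) hval
      (initVis graph visited).length row ((initVis graph visited).set k true) depth []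
      hcnt gset (goodN_row hval (reachSet_start graph x y _) hxy hr) (by simp)
    have hA : dfsAux graph y ((initVis graph visited).length + 1) x (initVis graph visited) depth
        = some (r, v') := by
      rw [dfsAux]
      simp only [hset, if_neg hxy, hr]
      exact e
    rw [List.append_nil] at heq
    by_cases hr1 : r = -1
    · simp only [dfs, dfs_alt, hA, hset, if_neg hxy, hr, heq, if_pos hr1, dfsLoop_nil, hr1]
      rfl
    · simp only [dfs, dfs_alt, hA, hset, if_neg hxy, hr, heq, if_neg hr1]
      rfl
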